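-- pv_equiv track=rewrite | github.com/YeHtutAung/kuunyi-support-agent | my_support_agent/tools/knowledge.py | _search_sections
-- ===== SOURCE A (Python) =====
-- _STOP_WORDS = {"what", "is", "the", "a", "an", "how", "do", "i", "can", "to", "my", "me", "are", "for", "of", "in", "and", "or"}
--
-- def _search_sections(kb_content: str | None, query: str) -> list[str]:
--     """Split knowledge base into sections and return matching ones.
--
--     Exported for testing. The tool function below wraps this.
--     """
--     if not kb_content or not query or not query.strip():
--         return []
--
--     # Split by ## headers
--     sections: list[str] = []
--     current_section = ""
--     for line in kb_content.split("\n"):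
--         if line.startswith("## "):
--             if current_section.strip():
--                 sections.append(current_section.strip())
--             current_section = line + "\n"
--         else:
--             current_section += line + "\n"
--     if current_section.strip():
--         sections.append(current_section.strip())
--
--     # Tokenize query, remove stop words
--     keywords = [
--         w for w in query.lower().split()
--         if w not in _STOP_WORDS and len(w) > 1
--     ]
--     if not keywords:
--         # All words were stop words — use original query words
--         keywords = [w for w in query.lower().split() if len(w) > 1]
--
--     # Return sections where any keyword appears
--     matches = []
--     for section in sections:
--         section_lower = section.lower()
--         if any(kw in section_lower for kw in keywords):
--             matches.append(section)
--
--     return matches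
-- ===== SOURCE B (Python) =====
-- _STOP_WORDS = {"what", "is", "the", "a", "an", "how", "do", "i", "can", "to", "my", "me", "are", "for", "of", "in", "and", "or"}
--
--
-- def _chunks(lines):
--     """Recursively partition lines into runs, starting a new run before each '## ' line."""
--     if not lines:
--         return []
--     i = 1
--     while i < len(lines) and not lines[i].startswith("## "):
--         i += 1
--     return [lines[:i]] + _chunks(lines[i:])
--
--
-- def _search_sections(kb_content, query):
--     if not kb_content or not query or not query.strip():
--         return []
--     sections = [s for s in ("\n".join(ch).strip() for ch in _chunks(kb_content.split("\n"))) if s]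
--     words = [w for w in query.lower().split() if len(w) > 1]
--     keywords = [w for w in words if w not in _STOP_WORDS] or words
--     return [s for s in sections if any(kw in s.lower() for kw in keywords)]
-- ===== Notes on version B (the rewrite author's own statement) =====
-- stated objective: alternative
-- what changed: Replaces A's line-by-line accumulator (current_section grown and flushed on each header) with a recursive span-based partition of the line list into chunks starting before each '## ' line, each chunk joined/stripped once; the keyword fallback is expressed as a single filter with an 'or' fallback instead of two full re-tokenizations.
import Mathlib
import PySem

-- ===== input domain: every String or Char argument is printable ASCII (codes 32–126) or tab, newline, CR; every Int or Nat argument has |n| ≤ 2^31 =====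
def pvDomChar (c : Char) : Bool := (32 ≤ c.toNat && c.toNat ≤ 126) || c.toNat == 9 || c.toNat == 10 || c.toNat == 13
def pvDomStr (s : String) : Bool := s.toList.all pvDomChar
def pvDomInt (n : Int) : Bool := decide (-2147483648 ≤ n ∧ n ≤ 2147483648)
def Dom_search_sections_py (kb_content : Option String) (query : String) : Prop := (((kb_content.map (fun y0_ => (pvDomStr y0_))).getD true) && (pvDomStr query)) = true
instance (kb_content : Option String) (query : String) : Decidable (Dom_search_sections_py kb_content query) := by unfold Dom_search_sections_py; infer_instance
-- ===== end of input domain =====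

set_option maxRecDepth 8192


-- B replaces A's accumulator-based section splitting by a recursive span-based partition
-- of the line list into chunks (alternative decomposition; return value proved equal).

def pvHdr : List Char := ['#', '#', ' ']

def pvStop : List (List Char) :=
  ["what".toList, "is".toList, "the".toList, "a".toList, "an".toList, "how".toList,
   "do".toList, "i".toList, "can".toList, "to".toList, "my".toList, "me".toList,
   "are".toList, "for".toList, "of".toList, "in".toList, "and".toList, "or".toList]

-- ===== PORT A =====
-- the 'for line in kb_content.split("\n")' loop with state (sections, current_section),
-- including the final flush of current_section
def pvLoopA : List (List Char) → List (List Char) → List Char → List (List Char)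
  | [], secs, cur =>
      if PySem.Chars.strip cur ≠ [] then secs ++ [PySem.Chars.strip cur] else secs
  | line :: rest, secs, cur =>
      if PySem.Chars.startswith line pvHdr then
        pvLoopA rest
          (if PySem.Chars.strip cur ≠ [] then secs ++ [PySem.Chars.strip cur] else secs)
          (line ++ ['\n'])
      else
        pvLoopA rest secs (cur ++ line ++ ['\n'])

def search_sections_py (kb_content : Option String) (query : String) : List String :=
  match kb_content with
  | none => []
  | some c =>
    if c = "" || query = "" || PySem.Str.strip query = "" then []
    else
      let sections := pvLoopA (PySem.Chars.splitOn c.toList ['\n']) [] []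
      let kws := (PySem.Chars.split₀ (PySem.Chars.lower query.toList)).filter
        (fun w => !(pvStop.contains w) && decide (w.length > 1))
      let keywords :=
        if kws = [] then
          (PySem.Chars.split₀ (PySem.Chars.lower query.toList)).filter
            (fun w => decide (w.length > 1))
        else kws
      (sections.filter
        (fun s => keywords.any (fun kw => PySem.Chars.isIn kw (PySem.Chars.lower s)))).map String.ofList

-- ===== PORT B =====
-- the while-loop of _chunks collecting lines[1:i] (lines until the next '## ' line)
def pvBody : List (List Char) → List (List Char)
  | [] => []
  | x :: xs => if PySem.Chars.startswith x pvHdr then [] else x :: pvBody xs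

-- recursive partition: [lines[:i]] + _chunks(lines[i:])
def pvChunks : List (List Char) → List (List (List Char))
  | [] => []
  | l :: xs =>
      let body := pvBody xs
      (l :: body) :: pvChunks (xs.drop body.length)
termination_by lines => lines.length
decreasing_by
  simp only [List.length_cons, List.length_drop]
  omega

def search_sections_py_alt (kb_content : Option String) (query : String) : List String :=
  match kb_content with
  | none => []
  | some c =>
    if c = "" || query = "" || PySem.Str.strip query = "" then []
    else
      let sections :=
        ((pvChunks (PySem.Chars.splitOn c.toList ['\n'])).map
          (fun ch => PySem.Chars.strip (PySem.Chars.join ['\n'] ch))).filter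
          (fun s => !s.isEmpty)
      let words := (PySem.Chars.split₀ (PySem.Chars.lower query.toList)).filter
        (fun w => decide (w.length > 1))
      let kws := words.filter (fun w => !(pvStop.contains w))
      let keywords := if kws = [] then words else kws
      (sections.filter
        (fun s => keywords.any (fun kw => PySem.Chars.isIn kw (PySem.Chars.lower s)))).map String.ofList

-- ===== PRECONDITION & SPEC =====
def Spec_search_sections_py (kb_content : Option String) (query : String) (out : List String) : Prop := out = search_sections_py_alt kb_content query
instance (kb_content : Option String) (query : String) (out : List String) : Decidable (Spec_search_sections_py kb_content query out) := by unfold Spec_search_sections_py; infer_instance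

-- ===== CLAIM (what is proved, stated in full; the proofs are below) =====
def Claim_equal_search_sections_py : Prop := ∀ (kb_content : Option String) (query : String), Dom_search_sections_py kb_content query → Spec_search_sections_py kb_content query (search_sections_py kb_content query)

-- ===== LEMMAS AND PROOFS =====

-- the predicate "line does not start a new section"
def pvNotH (x : List Char) : Bool := !(PySem.Chars.startswith x pvHdr)

-- current_section accumulated over a run of lines g: each line followed by '\n'
def pvCat : List (List Char) → List Char
  | [] => []
  | l :: g => l ++ '\n' :: pvCat g

theorem pvStrip_nil : PySem.Chars.strip [] = [] := by decide

theorem pvLoopA_append (lines : List (List Char)) :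
    ∀ secs cur, pvLoopA lines secs cur = secs ++ pvLoopA lines [] cur := by
  induction lines with
  | nil =>
      intro secs cur
      simp only [pvLoopA]
      split <;> simp
  | cons line rest ih =>
      intro secs cur
      simp only [pvLoopA]
      by_cases hh : PySem.Chars.startswith line pvHdr = true
      · simp only [hh, if_true]
        rw [ih, ih (if PySem.Chars.strip cur ≠ [] then [] ++ [PySem.Chars.strip cur] else [])]
        by_cases h : PySem.Chars.strip cur = [] <;> simp [h]
      · simp only [hh, Bool.false_eq_true, if_false]
        exact ih secs (cur ++ line ++ ['\n'])

theorem pvStrip_snoc_nl (x : List Char) :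
    PySem.Chars.strip (x ++ ['\n']) = PySem.Chars.strip x := by
  have hnl : PySem.Chars.isspace '\n' = true := by decide
  simp only [PySem.Chars.strip, PySem.Chars.lstrip, PySem.Chars.rstrip]
  rw [List.dropWhile_append]
  by_cases h : (List.dropWhile PySem.Chars.isspace x).isEmpty = true
  · simp only [List.isEmpty_iff] at h
    simp [h, List.dropWhile, hnl]
  · simp [h, List.reverse_append, List.dropWhile, hnl]

theorem pvBody_eq_takeWhile (xs : List (List Char)) :
    pvBody xs = xs.takeWhile pvNotH := by
  induction xs with
  | nil => simp [pvBody]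
  | cons x t ih =>
      simp only [pvBody, List.takeWhile, pvNotH]
      by_cases h : PySem.Chars.startswith x pvHdr = true <;> simp [h, ih]

theorem pvDrop_takeWhile (xs : List (List Char)) :
    xs.drop (xs.takeWhile pvNotH).length = xs.dropWhile pvNotH := by
  induction xs with
  | nil => simp
  | cons x t ih =>
      by_cases h : pvNotH x = true <;> simp [List.takeWhile, List.dropWhile, h, ih]

-- the value of current_section accumulated over the header-free prefix
theorem pvLoopA_group (lines : List (List Char)) :
    ∀ cur, pvLoopA lines [] cur =
      (if PySem.Chars.strip (cur ++ pvCat (lines.takeWhile pvNotH)) ≠ [] then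
        [PySem.Chars.strip (cur ++ pvCat (lines.takeWhile pvNotH))] else []) ++
      pvLoopA (lines.dropWhile pvNotH) [] [] := by
  induction lines with
  | nil =>
      intro cur
      simp only [List.takeWhile, List.dropWhile, pvCat, List.append_nil, pvLoopA]
      by_cases h : PySem.Chars.strip cur ≠ [] <;> simp [h, pvStrip_nil]
  | cons line rest ih =>
      intro cur
      by_cases hh : PySem.Chars.startswith line pvHdr = true
      · have hn : pvNotH line = false := by simp [pvNotH, hh]
        simp only [List.takeWhile, List.dropWhile, hn, cond_false, pvCat, List.append_nil]
        conv_lhs => rw [show pvLoopA (line :: rest) [] cur =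
          pvLoopA rest (if PySem.Chars.strip cur ≠ [] then [PySem.Chars.strip cur] else [])
            (line ++ ['\n']) from by simp [pvLoopA, hh]]
        rw [pvLoopA_append]
        congr 1
        show _ = pvLoopA (line :: rest) [] []
        simp [pvLoopA, hh, pvStrip_nil]
      · have hn : pvNotH line = true := by simp [pvNotH, hh]
        simp only [List.takeWhile, List.dropWhile, hn, cond_true, pvCat]
        rw [show pvLoopA (line :: rest) [] cur
              = pvLoopA rest [] (cur ++ line ++ ['\n']) from by simp [pvLoopA, hh]]
        rw [ih]
        simp [List.append_assoc]

theorem pvCat_eq_join (g : List (List Char)) (hg : g ≠ []) :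
    pvCat g = PySem.Chars.join ['\n'] g ++ ['\n'] := by
  induction g with
  | nil => simp at hg
  | cons l t ih =>
      cases t with
      | nil => simp [pvCat, PySem.Chars.join, List.intercalate]
      | cons y t' =>
          rw [PySem.Chars.join_cons_cons,
            show pvCat (l :: y :: t') = l ++ '\n' :: pvCat (y :: t') from rfl,
            ih (by simp)]
          simp [List.append_assoc]

theorem pvSections_eq (lines : List (List Char)) :
    pvLoopA lines [] [] =
      ((pvChunks lines).map (fun ch => PySem.Chars.strip (PySem.Chars.join ['\n'] ch))).filter
        (fun s => !s.isEmpty) := by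
  induction lines using pvChunks.induct with
  | case1 => simp [pvLoopA, pvChunks, pvStrip_nil]
  | case2 l xs body ih =>
      have hbody : pvBody xs = xs.takeWhile pvNotH := pvBody_eq_takeWhile xs
      have hchunks : pvChunks (l :: xs) =
          (l :: xs.takeWhile pvNotH) :: pvChunks (xs.dropWhile pvNotH) := by
        rw [show pvChunks (l :: xs)
              = (l :: pvBody xs) :: pvChunks (xs.drop (pvBody xs).length) from by
            simp only [pvChunks]]
        rw [hbody, pvDrop_takeWhile]
      have hstrip : PySem.Chars.strip (pvCat (l :: xs.takeWhile pvNotH)) =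
          PySem.Chars.strip (PySem.Chars.join ['\n'] (l :: xs.takeWhile pvNotH)) := by
        rw [pvCat_eq_join _ (by simp), pvStrip_snoc_nl]
      have lhs_eq : pvLoopA (l :: xs) [] [] =
          (if PySem.Chars.strip (pvCat (l :: xs.takeWhile pvNotH)) ≠ [] then
            [PySem.Chars.strip (pvCat (l :: xs.takeWhile pvNotH))] else []) ++
          pvLoopA (xs.dropWhile pvNotH) [] [] := by
        by_cases hh : PySem.Chars.startswith l pvHdr = true
        · rw [show pvLoopA (l :: xs) [] [] = pvLoopA xs [] (l ++ ['\n']) from by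
            simp [pvLoopA, hh, pvStrip_nil]]
          rw [pvLoopA_group]
          congr 2
          · simp [pvCat, List.append_assoc]
          · simp [pvCat, List.append_assoc]
        · have hn : pvNotH l = true := by simp [pvNotH, hh]
          rw [pvLoopA_group]
          simp [List.takeWhile, List.dropWhile, hn]
      have ih' : pvLoopA (xs.dropWhile pvNotH) [] [] =
          List.filter (fun s => !s.isEmpty)
            ((pvChunks (xs.dropWhile pvNotH)).map
              (fun ch => PySem.Chars.strip (PySem.Chars.join ['\n'] ch))) := by
        rw [← pvDrop_takeWhile, ← hbody]; exact ih
      rw [lhs_eq, ih', hchunks, List.map_cons, List.filter_cons]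
      by_cases h : PySem.Chars.strip (PySem.Chars.join ['\n'] (l :: xs.takeWhile pvNotH)) = []
      · rw [hstrip]
        simp [h]
      · rw [hstrip]
        simp [h]

theorem pvKeywords_eq (l : List (List Char)) :
    (l.filter (fun w => decide (w.length > 1))).filter (fun w => !(pvStop.contains w)) =
      l.filter (fun w => !(pvStop.contains w) && decide (w.length > 1)) := by
  rw [List.filter_filter]

-- ===== VERDICT (by name: the statement is the Claim_ definition above) =====
theorem search_sections_py_spec : Claim_equal_search_sections_py := by
  intro kb_content query _
  unfold Spec_search_sections_py search_sections_py search_sections_py_alt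
  cases kb_content with
  | none => rfl
  | some c =>
      by_cases hg : (c = "" || query = "" || PySem.Str.strip query = "") = true
      · simp [hg]
      · simp only [hg, Bool.false_eq_true, if_false]
        rw [pvSections_eq, pvKeywords_eq]
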